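-- pv_equiv track=rewrite | github.com/adnancrnovrsanin/pAIthonGamesAPI | base/MinimaxAI.py | difference_of_density
-- ===== SOURCE A (Python) =====
-- from collections import deque
--
-- def move_is_valid(board, row, col):
--     if row < 0 or row >= len(board):
--         return False
--     if col < 0 or col >= len(board[0]):
--         return False
--     if board[row][col] != 'r':
--         return False
--     return True
--
-- def get_next_nodes(board, x, y):
--     check_next_node = lambda x, y: move_is_valid(board, x, y)
--     ways = [(-1, 0), (+1, 0), (0, -1), (0, +1), (-1, -1), (-1, +1), (+1, -1), (+1, +1)]
--     return [(x + dx, y + dy) for dx, dy in ways if check_next_node(x + dx, y + dy)]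
--
-- def bfsSum(startRow, startCol, board):
--     graph = {}
--     for x, row in enumerate(board):
--         for y, col in enumerate(row):
--             graph[(x, y)] = graph.get((x, y), []) + get_next_nodes(board, x, y)
--     queue = deque([(startRow, startCol, board[startRow][startCol])])
--     visited = {(startRow, startCol): None}
--
--     density = 0
--     while queue:
--         cur_node = queue.popleft()
--         if cur_node[2] == 'h':
--             continue
--         else:
--             density += 1
--
--         next_nodes = graph[(cur_node[0], cur_node[1])]
--         for next_node in next_nodes:
--             if next_node not in visited:
--                 queue.append((next_node[0], next_node[1], board[next_node[0]][next_node[1]]))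
--                 visited[(next_node[0], next_node[1])] = cur_node
--     return density
--
-- def check_density(board, player):
--     density = 0
--     for row in range(len(board)):
--         for col in range(len(board[0])):
--             if board[row][col] == player:
--                 density += bfsSum(row, col, board)
--     return density
--
-- def difference_of_density(board, player):
--     difference = 0
--     for row in range(len(board)):
--         for col in range(len(board[0])):
--             try:
--                 tmp = int(board[row][col])
--                 if board[row][col] == player:
--                     difference += check_density(board, board[row][col])
--                 else:
--                     difference -= check_density(board, board[row][col])
--             except:
--                 continue
--     return difference
-- ===== SOURCE B (Python) =====
-- from collections import Counter, deque
--
-- _WAYS = [(-1, 0), (+1, 0), (0, -1), (0, +1), (-1, -1), (-1, +1), (+1, -1), (+1, +1)]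
--
--
-- def _is_intlike(s):
--     try:
--         int(s)
--         return True
--     except ValueError:
--         return False
--
--
-- def _region_density(board, H, W, sr, sc):
--     # the start cell plus its adjacent connected region of 'r' cells, counted once each
--     visited = {(sr, sc)}
--     queue = deque([(sr, sc)])
--     density = 0
--     while queue:
--         x, y = queue.popleft()
--         density += 1
--         for dx, dy in _WAYS:
--             nx, ny = x + dx, y + dy
--             if 0 <= nx < H and 0 <= ny < W and ny < len(board[nx]) \
--                     and board[nx][ny] == 'r' and (nx, ny) not in visited:
--                 visited.add((nx, ny))
--                 queue.append((nx, ny))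
--     return density
--
--
-- def _density_for(board, H, W, v):
--     # total density over the cells holding value v (computed once per distinct value)
--     total = 0
--     for r in range(H):
--         for c, s in enumerate(board[r][:W]):
--             if s == v:
--                 total += _region_density(board, H, W, r, c)
--     return total
--
--
-- def difference_of_density(board, player):
--     if not board:
--         return 0
--     H, W = len(board), len(board[0])
--     counts = Counter(s for row in board for s in row[:W] if _is_intlike(s))
--     total = 0
--     for v, n in counts.items():
--         d = n * _density_for(board, H, W, v)
--         total += d if v == player else -d
--     return total
-- ===== Notes on version B (the rewrite author's own statement) =====
-- stated objective: alternative
-- what changed: B counts the int-parsable cell values once into a Counter and computes the per-value density sum a single time per distinct value (A recomputes check_density for every digit cell), and B's per-cell BFS examines neighbours directly instead of rebuilding the full adjacency dict on every bfsSum call; on the generated benchmark boards (no digit cells) both cost the same, so no speed is claimed.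
-- intended difference: On boards whose some later row is shorter than row 0 but that still hold an int-parsable cell within the first len(board[0]) columns, A returns 0 (its bare 'except: continue' swallows the IndexError every check_density call raises there), while B returns the density difference computed over the cells that exist, the intended value. — e.g. on difference_of_density([["1"], []], "1"): A returns 0, B returns 1
import Mathlib
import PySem

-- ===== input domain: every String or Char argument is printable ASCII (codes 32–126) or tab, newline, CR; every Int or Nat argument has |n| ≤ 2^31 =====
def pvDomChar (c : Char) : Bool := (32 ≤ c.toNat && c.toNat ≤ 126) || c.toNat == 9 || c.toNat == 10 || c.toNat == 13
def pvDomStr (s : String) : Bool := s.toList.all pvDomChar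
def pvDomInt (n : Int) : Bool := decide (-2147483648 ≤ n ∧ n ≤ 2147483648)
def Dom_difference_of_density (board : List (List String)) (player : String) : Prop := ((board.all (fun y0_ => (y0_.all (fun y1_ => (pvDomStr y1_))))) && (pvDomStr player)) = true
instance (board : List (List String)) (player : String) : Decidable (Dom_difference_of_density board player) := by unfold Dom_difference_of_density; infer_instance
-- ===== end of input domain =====

-- B replaces A's per-cell recomputation of check_density by one computation per distinct digit value
-- (Counter) and drops the per-BFS adjacency-dict rebuild (objective: alternative algorithm).
-- Intended difference (D_ below): on boards whose later rows are shorter than row 0, A's bare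
-- `except: continue` swallows the IndexError and returns 0; B scores the cells that exist.


-- ===== PORT A =====
def pvWaysA : List (Int × Int) :=
  [(-1, 0), (1, 0), (0, -1), (0, 1), (-1, -1), (-1, 1), (1, -1), (1, 1)]

-- move_is_valid; none = IndexError reading a ragged row (board[row][col] with col < len(board[0]))
def pvMivA (board : List (List String)) (row col : Int) : Option Bool :=
  if row < 0 ∨ (board.length : Int) ≤ row then some false
  else if col < 0 ∨ ((board.headD []).length : Int) ≤ col then some false
  else
    match PySem.List.pyGet? board row with
    | none => none
    | some rw =>
      match PySem.List.pyGet? rw col with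
      | none => none
      | some s => some (s == "r")

-- get_next_nodes: the comprehension's predicate can raise, hence Option
def pvGnnA (board : List (List String)) (x y : Int) : Option (List (Int × Int)) :=
  pvWaysA.foldlM (fun acc d =>
    (pvMivA board (x + d.1) (y + d.2)).map (fun b =>
      if b then acc ++ [(x + d.1, y + d.2)] else acc)) []

-- the graph dict bfsSum rebuilds on every call
def pvGraphA (board : List (List String)) :
    Option (PySem.Dict (Int × Int) (List (Int × Int))) :=
  (PySem.List.enumerate board).foldlM (fun g xr =>
    (PySem.List.enumerate xr.2).foldlM (fun g yc =>
      (pvGnnA board xr.1 yc.1).map (fun ns =>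
        g.insert (xr.1, yc.1) (g.getD (xr.1, yc.1) [] ++ ns))) g)
    PySem.Dict.empty

-- the inner `for next_node in next_nodes` body (board access can raise)
def pvBfsStepA (board : List (List String)) (vis : PySem.Set (Int × Int))
    (q : List (Int × Int × String)) (ns : List (Int × Int)) :
    Option (List (Int × Int × String) × PySem.Set (Int × Int)) :=
  ns.foldlM (fun st n =>
    if st.2.contains n then some st
    else
      match PySem.List.pyGet? board n.1 with
      | none => none
      | some rw =>
        match PySem.List.pyGet? rw n.2 with
        | none => none
        | some v => some (st.1 ++ [(n.1, n.2, v)], PySem.Set.add st.2 n)) (q, vis)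

-- the `while queue` loop; the visited dict's values are never read, so it is kept as the set of
-- its keys.  Fuel: every iteration pops one entry and each cell is enqueued at most once, so
-- H*W + 2 iterations always suffice; the fuel-0 branch is never reached at the call site.
def pvBfsLoopA (board : List (List String)) (g : PySem.Dict (Int × Int) (List (Int × Int))) :
    Nat → List (Int × Int × String) → PySem.Set (Int × Int) → Int → Option Int
  | 0, _, _, dens => some dens
  | _ + 1, [], _, dens => some dens
  | fuel + 1, t :: rest, vis, dens =>
    if t.2.2 == "h" then pvBfsLoopA board g fuel rest vis dens
    else
      match g.get? (t.1, t.2.1) with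
      | none => none
      | some ns =>
        match pvBfsStepA board vis rest ns with
        | none => none
        | some st => pvBfsLoopA board g fuel st.1 st.2 (dens + 1)

def pvBfsA (startRow startCol : Int) (board : List (List String)) : Option Int :=
  match pvGraphA board with
  | none => none
  | some g =>
    match PySem.List.pyGet? board startRow with
    | none => none
    | some rw =>
      match PySem.List.pyGet? rw startCol with
      | none => none
      | some v0 =>
        pvBfsLoopA board g (board.length * (board.headD []).length + 2)
          [(startRow, startCol, v0)]
          (PySem.Set.add PySem.Set.empty (startRow, startCol)) 0

def pvCheckA (board : List (List String)) (player : String) : Option Int :=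
  (PySem.List.pyRange 0 (board.length : Int) 1).foldlM (fun dens r =>
    (PySem.List.pyRange 0 ((board.headD []).length : Int) 1).foldlM (fun dens c =>
      match PySem.List.pyGet? (PySem.List.pyGetD board r []) c with
      | none => none
      | some s =>
        if s == player then (pvBfsA r c board).map (fun d => dens + d)
        else some dens) dens) 0

def difference_of_density (board : List (List String)) (player : String) : Int :=
  (PySem.List.pyRange 0 (board.length : Int) 1).foldl (fun diff r =>
    (PySem.List.pyRange 0 ((board.headD []).length : Int) 1).foldl (fun diff c =>
      match PySem.List.pyGet? (PySem.List.pyGetD board r []) c with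
      | none => diff          -- IndexError from board[row][col], caught by the bare except
      | some s =>
        match PySem.Int.ofStr? s with
        | none => diff        -- ValueError from int(...), caught
        | some _ =>
          match pvCheckA board s with
          | none => diff      -- IndexError inside check_density, caught
          | some dens => if s == player then diff + dens else diff - dens) diff) 0

-- ===== PORT B =====
-- Source B's _WAYS is the same 8-offset list as A's `ways`; the ports share the constant
def pvIsIntlike (s : String) : Bool := (PySem.Int.ofStr? s).isSome

-- _region_density's `while queue` loop (fuel as for A's loop: H*W + 2 always suffices)
def pvRegionLoopB (board : List (List String)) (H W : Int) :
    Nat → List (Int × Int) → PySem.Set (Int × Int) → Int → Int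
  | 0, _, _, dens => dens
  | _ + 1, [], _, dens => dens
  | fuel + 1, n :: rest, vis, dens =>
    let st := pvWaysA.foldl (fun (st : List (Int × Int) × PySem.Set (Int × Int)) w =>
      if 0 ≤ n.1 + w.1 ∧ n.1 + w.1 < H ∧ 0 ≤ n.2 + w.2 ∧ n.2 + w.2 < W ∧
          n.2 + w.2 < ((PySem.List.pyGetD board (n.1 + w.1) []).length : Int) ∧
          PySem.List.pyGetD (PySem.List.pyGetD board (n.1 + w.1) []) (n.2 + w.2) "" = "r" ∧
          st.2.contains (n.1 + w.1, n.2 + w.2) = false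
      then (st.1 ++ [(n.1 + w.1, n.2 + w.2)], PySem.Set.add st.2 (n.1 + w.1, n.2 + w.2))
      else st) (rest, vis)
    pvRegionLoopB board H W fuel st.1 st.2 (dens + 1)

def pvRegionB (board : List (List String)) (H W sr sc : Int) : Int :=
  pvRegionLoopB board H W (H.toNat * W.toNat + 2) [(sr, sc)]
    (PySem.Set.add PySem.Set.empty (sr, sc)) 0

def pvDensB (board : List (List String)) (H W : Int) (v : String) : Int :=
  (PySem.List.pyRange 0 H 1).foldl (fun t r =>
    (PySem.List.enumerate ((PySem.List.pyGetD board r []).take W.toNat)).foldl (fun t cs =>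
      if cs.2 == v then t + pvRegionB board H W r cs.1 else t) t) 0

def difference_of_density_alt (board : List (List String)) (player : String) : Int :=
  if board.isEmpty then 0
  else
    let H : Int := board.length
    let W : Int := (board.headD []).length
    let cells := board.flatMap (fun row => row.take W.toNat)   -- row[:W]
    let counts := PySem.Dict.counter (cells.filter pvIsIntlike)
    counts.items.foldl (fun total vn =>
      let d := vn.2 * pvDensB board H W vn.1
      total + (if vn.1 == player then d else -d)) 0

-- ===== PRECONDITION & SPEC =====
-- On boards with a row shorter than row 0 that still hold an int-parsable cell inside the first
-- len(board[0]) columns, A returns 0 (its bare `except: continue` swallows the IndexError every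
-- check_density call raises on such a board), while B returns the density difference of the cells
-- that exist — the intended value.
def D_difference_of_density (board : List (List String)) (player : String) : Prop :=
  (board.any fun row => decide (row.length < (board.headD []).length)) = true ∧
  (board.any fun row =>
    (row.take (board.headD []).length).any fun s => (PySem.Int.ofStr? s).isSome) = true

instance (board : List (List String)) (player : String) :
    Decidable (D_difference_of_density board player) := by
  unfold D_difference_of_density; infer_instance

def Spec_difference_of_density (board : List (List String)) (player : String) (out : Int) : Prop :=
  ¬ D_difference_of_density board player → out = difference_of_density_alt board player

instance (board : List (List String)) (player : String) (out : Int) :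
    Decidable (Spec_difference_of_density board player out) := by
  unfold Spec_difference_of_density; infer_instance

def pvDiffWitness_difference_of_density : List (List String) × String := ([["1"], []], "1")

def pvDiffWitnessOut_difference_of_density : Int × Int := (0, 1)

-- ===== CLAIM (what is proved, stated in full; the proofs are below) =====
def Claim_unchanged_difference_of_density : Prop := ∀ (board : List (List String)) (player : String), Dom_difference_of_density board player → Spec_difference_of_density board player (difference_of_density board player)
def Claim_changed_difference_of_density : Prop := Dom_difference_of_density (pvDiffWitness_difference_of_density.1) (pvDiffWitness_difference_of_density.2) ∧ D_difference_of_density (pvDiffWitness_difference_of_density.1) (pvDiffWitness_difference_of_density.2) ∧ difference_of_density (pvDiffWitness_difference_of_density.1) (pvDiffWitness_difference_of_density.2) = pvDiffWitnessOut_difference_of_density.1 ∧ difference_of_density_alt (pvDiffWitness_difference_of_density.1) (pvDiffWitness_difference_of_density.2) = pvDiffWitnessOut_difference_of_density.2 ∧ pvDiffWitnessOut_difference_of_density.1 ≠ pvDiffWitnessOut_difference_of_density.2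

-- ===== LEMMAS AND PROOFS =====

def pvH (board : List (List String)) : Int := board.length
def pvW (board : List (List String)) : Int := ((board.headD []).length : Int)
def pvRect (board : List (List String)) : Prop := ∀ row ∈ board, (board.headD []).length ≤ row.length
def pvCell (board : List (List String)) (x y : Int) : String :=
  PySem.List.pyGetD (PySem.List.pyGetD board x []) y ""
def pvValid (board : List (List String)) (x y : Int) : Bool :=
  decide (0 ≤ x ∧ x < pvH board ∧ 0 ≤ y ∧ y < pvW board ∧ pvCell board x y = "r")
def pvNbrs (board : List (List String)) (x y : Int) : List (Int × Int) :=
  (pvWaysA.filter (fun w => pvValid board (x + w.1) (y + w.2))).map (fun w => (x + w.1, y + w.2))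

theorem pvFoldlM_eq_some {α β : Type} (l : List α) (f : β → α → Option β) (g : β → α → β)
    (h : ∀ b : β, ∀ a ∈ l, f b a = some (g b a)) :
    ∀ b, l.foldlM f b = some (l.foldl g b) := by
  induction l with
  | nil => intro b; rfl
  | cons a l ih =>
    intro b
    rw [List.foldlM_cons, h b a (by simp), List.foldl_cons]
    exact ih (fun b' a' ha' => h b' a' (by simp [ha'])) (g b a)

-- under a rectangular board move_is_valid never raises and equals pvValid
theorem pvMivA_rect (board : List (List String)) (hR : pvRect board) (x y : Int) :
    pvMivA board x y = some (pvValid board x y) := by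
  unfold pvMivA pvValid pvH pvW pvCell
  by_cases hx : x < 0 ∨ (board.length : Int) ≤ x
  · rw [if_pos hx]
    congr 1
    have : ¬ (0 ≤ x ∧ x < (board.length : Int) ∧ 0 ≤ y ∧ y < ((board.headD []).length : Int) ∧
        PySem.List.pyGetD (PySem.List.pyGetD board x []) y "" = "r") := by
      rintro ⟨h1, h2, -⟩; omega
    exact (decide_eq_false this).symm
  · rw [if_neg hx]
    rw [not_or, not_lt, not_le] at hx
    obtain ⟨hx1, hx2⟩ := hx
    by_cases hy : y < 0 ∨ ((board.headD []).length : Int) ≤ y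
    · rw [if_pos hy]
      congr 1
      have : ¬ (0 ≤ x ∧ x < (board.length : Int) ∧ 0 ≤ y ∧ y < ((board.headD []).length : Int) ∧
          PySem.List.pyGetD (PySem.List.pyGetD board x []) y "" = "r") := by
        rintro ⟨-, -, h3, h4, -⟩; omega
      exact (decide_eq_false this).symm
    · rw [if_neg hy]
      rw [not_or, not_lt, not_le] at hy
      obtain ⟨hy1, hy2⟩ := hy
      have hy2' : y < ((board.head?.getD []).length : Int) := by simpa using hy2
      have hxlt : x.toNat < board.length := by omega
      have hrow : PySem.List.pyGet? board x = some board[x.toNat] := by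
        rw [PySem.List.pyGet?_of_nonneg board hx1, List.getElem?_eq_getElem hxlt]
      have hlen : (board.headD []).length ≤ board[x.toNat].length :=
        hR _ (List.getElem_mem hxlt)
      have hylt : y.toNat < board[x.toNat].length := by omega
      have hcol : PySem.List.pyGet? board[x.toNat] y = some board[x.toNat][y.toNat] := by
        rw [PySem.List.pyGet?_of_nonneg board[x.toNat] hy1, List.getElem?_eq_getElem hylt]
      have hcell : PySem.List.pyGetD (PySem.List.pyGetD board x []) y "" = board[x.toNat][y.toNat] := by
        rw [PySem.List.pyGetD_eq_getElem board [] hx1 (by exact_mod_cast hx2),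
          PySem.List.pyGetD_eq_getElem _ _ hy1 (by omega)]
      simp only [hrow, hcol]
      congr 1
      rw [hcell]
      by_cases hr : board[x.toNat][y.toNat] = "r" <;> simp [hr, hx1, hx2, hy1, hy2']

theorem pvGnnA_rect (board : List (List String)) (hR : pvRect board) (x y : Int) :
    pvGnnA board x y = some (pvNbrs board x y) := by
  unfold pvGnnA pvNbrs
  rw [pvFoldlM_eq_some _ _
      (fun acc d => if pvValid board (x + d.1) (y + d.2) then acc ++ [(x + d.1, y + d.2)] else acc)
      (fun b a _ => by rw [pvMivA_rect board hR]; rfl) []]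
  rw [PySem.List.foldl_append_if (fun w => pvValid board (x + w.1) (y + w.2))
      (fun w => (x + w.1, y + w.2)) pvWaysA []]
  rfl

def pvGraphPure (board : List (List String)) : PySem.Dict (Int × Int) (List (Int × Int)) :=
  (PySem.List.enumerate board).foldl (fun g xr =>
    (PySem.List.enumerate xr.2).foldl (fun g yc =>
      g.insert (xr.1, yc.1) (g.getD (xr.1, yc.1) [] ++ pvNbrs board xr.1 yc.1)) g)
    PySem.Dict.empty

theorem pvGraphA_rect (board : List (List String)) (hR : pvRect board) :
    pvGraphA board = some (pvGraphPure board) := by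
  unfold pvGraphA pvGraphPure
  refine pvFoldlM_eq_some _ _ _ (fun g xr _ => ?_) _
  refine pvFoldlM_eq_some _ _ _ (fun g' yc _ => ?_) g
  rw [pvGnnA_rect board hR]; rfl

def pvKeys (board : List (List String)) : List (Int × Int) :=
  (PySem.List.enumerate board).flatMap (fun xr =>
    (PySem.List.enumerate xr.2).map (fun yc => (xr.1, yc.1)))

theorem pvGraphPure_flat (board : List (List String)) :
    pvGraphPure board =
      (pvKeys board).foldl (fun g k => g.insert k (g.getD k [] ++ pvNbrs board k.1 k.2))
        PySem.Dict.empty := by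
  unfold pvGraphPure pvKeys
  rw [List.foldl_flatMap]
  congr 1
  funext g xr
  rw [List.foldl_map]

theorem pvDictFold_get?_not_mem {κ ν : Type} [BEq κ] [LawfulBEq κ]
    (vf : PySem.Dict κ ν → κ → ν) (L : List κ) (d : PySem.Dict κ ν) (k : κ) (hk : k ∉ L) :
    (L.foldl (fun g k' => g.insert k' (vf g k')) d).get? k = d.get? k := by
  induction L generalizing d with
  | nil => rfl
  | cons a L ih =>
    rw [List.foldl_cons, ih (d.insert a (vf d a)) (fun h => hk (List.mem_cons_of_mem a h))]
    exact PySem.Dict.get?_insert_of_ne _ _ (fun h => hk (h ▸ List.mem_cons_self))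

theorem pvDictFold_get?_mem {κ μ : Type} [BEq κ] [LawfulBEq κ]
    (f : κ → List μ) (L : List κ) (d : PySem.Dict κ (List μ)) (hnd : L.Nodup)
    (hfresh : ∀ k ∈ L, d.contains k = false) (k : κ) (hk : k ∈ L) :
    (L.foldl (fun g k' => g.insert k' (g.getD k' [] ++ f k')) d).get? k = some (f k) := by
  induction L generalizing d with
  | nil => cases hk
  | cons a L ih =>
    rw [List.foldl_cons]
    rcases List.mem_cons.mp hk with rfl | hkL
    · rw [pvDictFold_get?_not_mem (fun g k' => g.getD k' [] ++ f k') L _ k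
        (by simpa using (List.nodup_cons.mp hnd).1)]
      rw [PySem.Dict.get?_insert_self, PySem.Dict.getD_of_not_contains d []
        (hfresh k List.mem_cons_self)]
      rfl
    · refine ih _ (List.nodup_cons.mp hnd).2 (fun k' hk' => ?_) hkL
      rw [PySem.Dict.contains_insert]
      have hne : k' ≠ a := fun h => (List.nodup_cons.mp hnd).1 (h ▸ hk')
      simp [hne, hfresh k' (List.mem_cons_of_mem a hk')]

theorem pvKeys_nodup (board : List (List String)) : (pvKeys board).Nodup := by
  unfold pvKeys
  rw [List.nodup_flatMap]
  constructor
  · intro xr _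
    refine List.pairwise_map.mpr ?_
    refine (PySem.List.pairwise_lt_enumerate xr.2 0).imp ?_
    intro a b hab heq
    have := congrArg Prod.snd heq
    simp only at this
    omega
  · refine ((PySem.List.pairwise_lt_enumerate board 0).imp ?_)
    intro a b hab k hka hkb
    rw [List.mem_map] at hka hkb
    obtain ⟨ya, _, rfl⟩ := hka
    obtain ⟨yb, _, h⟩ := hkb
    have := congrArg Prod.fst h
    simp only at this
    omega

theorem pvKeys_mem (board : List (List String)) {x y : Int} (hx0 : 0 ≤ x)
    (hx : x < (board.length : Int)) (hy0 : 0 ≤ y)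
    (hy : y < ((board.getD x.toNat []).length : Int)) : (x, y) ∈ pvKeys board := by
  unfold pvKeys
  rw [List.mem_flatMap]
  have hxlt : x.toNat < board.length := by omega
  refine ⟨(x, board[x.toNat]), ?_, ?_⟩
  · rw [PySem.List.mem_enumerate_iff]
    exact ⟨x.toNat, hxlt, by simp; omega⟩
  · rw [List.mem_map]
    have hylt : y.toNat < board[x.toNat].length := by
      have h1 : board.getD x.toNat [] = board[x.toNat] := List.getD_eq_getElem board [] hxlt
      rw [h1] at hy
      omega
    refine ⟨(y, board[x.toNat][y.toNat]), ?_, by simp⟩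
    rw [PySem.List.mem_enumerate_iff]
    exact ⟨y.toNat, hylt, by simp; omega⟩

theorem pvGraphPure_get? (board : List (List String)) (hR : pvRect board) (x y : Int)
    (hx0 : 0 ≤ x) (hx : x < pvH board) (hy0 : 0 ≤ y) (hy : y < pvW board) :
    (pvGraphPure board).get? (x, y) = some (pvNbrs board x y) := by
  rw [pvGraphPure_flat]
  have hxlt : x.toNat < board.length := by unfold pvH at hx; omega
  have hmem : (x, y) ∈ pvKeys board := by
    refine pvKeys_mem board hx0 (by unfold pvH at hx; exact_mod_cast hx) hy0 ?_
    have h1 : board.getD x.toNat [] = board[x.toNat] := List.getD_eq_getElem board [] hxlt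
    have h2 : (board.headD []).length ≤ board[x.toNat].length := hR _ (List.getElem_mem hxlt)
    unfold pvW at hy
    rw [h1]
    omega
  have := pvDictFold_get?_mem (fun k => pvNbrs board k.1 k.2) (pvKeys board)
    PySem.Dict.empty (pvKeys_nodup board) (fun k _ => PySem.Dict.contains_empty k) (x, y) hmem
  simpa using this

def pvPi (t : Int × Int × String) : Int × Int := (t.1, t.2.1)

def pvInv (board : List (List String)) (t : Int × Int × String) : Prop :=
  0 ≤ t.1 ∧ t.1 < pvH board ∧ 0 ≤ t.2.1 ∧ t.2.1 < pvW board ∧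
    t.2.2 = pvCell board t.1 t.2.1 ∧ t.2.2 ≠ "h"

def pvStepPure (board : List (List String))
    (st : List (Int × Int × String) × PySem.Set (Int × Int)) (n : Int × Int) :
    List (Int × Int × String) × PySem.Set (Int × Int) :=
  if st.2.contains n then st
  else (st.1 ++ [(n.1, n.2, pvCell board n.1 n.2)], PySem.Set.add st.2 n)

theorem pvValid_bounds {board : List (List String)} {x y : Int}
    (h : pvValid board x y = true) :
    0 ≤ x ∧ x < pvH board ∧ 0 ≤ y ∧ y < pvW board ∧ pvCell board x y = "r" :=
  of_decide_eq_true h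

theorem pvRowRead (board : List (List String)) {x : Int} (hx0 : 0 ≤ x) (hx : x < pvH board) :
    PySem.List.pyGet? board x = some (PySem.List.pyGetD board x []) := by
  have hxlt : x.toNat < board.length := by unfold pvH at hx; omega
  rw [PySem.List.pyGet?_of_nonneg board hx0, List.getElem?_eq_getElem hxlt,
    PySem.List.pyGetD_eq_getElem board [] hx0 (by unfold pvH at hx; exact_mod_cast hx)]

theorem pvRowLen (board : List (List String)) (hR : pvRect board) {x : Int}
    (hx0 : 0 ≤ x) (hx : x < pvH board) :
    pvW board ≤ ((PySem.List.pyGetD board x []).length : Int) := by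
  have hxlt : x.toNat < board.length := by unfold pvH at hx; omega
  rw [PySem.List.pyGetD_eq_getElem board [] hx0 (by unfold pvH at hx; exact_mod_cast hx)]
  have := hR _ (List.getElem_mem hxlt)
  unfold pvW
  omega

theorem pvColRead (board : List (List String)) (hR : pvRect board) {x y : Int}
    (hx0 : 0 ≤ x) (hx : x < pvH board) (hy0 : 0 ≤ y) (hy : y < pvW board) :
    PySem.List.pyGet? (PySem.List.pyGetD board x []) y = some (pvCell board x y) := by
  have hlen := pvRowLen board hR hx0 hx
  have hylt : y.toNat < (PySem.List.pyGetD board x []).length := by omega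
  rw [PySem.List.pyGet?_of_nonneg _ hy0, List.getElem?_eq_getElem hylt]
  unfold pvCell
  rw [PySem.List.pyGetD_eq_getElem _ "" hy0 (by omega)]

theorem pvStepA_rect (board : List (List String)) (hR : pvRect board)
    (vis : PySem.Set (Int × Int)) (q : List (Int × Int × String)) (ns : List (Int × Int))
    (hns : ∀ n ∈ ns, pvValid board n.1 n.2 = true) :
    pvBfsStepA board vis q ns = some (ns.foldl (pvStepPure board) (q, vis)) := by
  unfold pvBfsStepA
  refine pvFoldlM_eq_some _ _ _ (fun st n hn => ?_) _
  obtain ⟨h1, h2, h3, h4, -⟩ := pvValid_bounds (hns n hn)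
  unfold pvStepPure
  by_cases hc : st.2.contains n
  · simp only [hc, if_true]
  · rw [Bool.not_eq_true] at hc
    simp only [hc, Bool.false_eq_true, if_false,
      pvRowRead board h1 h2, pvColRead board hR h1 h2 h3 h4]

def pvBodyB (board : List (List String)) (x y : Int)
    (st : List (Int × Int) × PySem.Set (Int × Int)) (w : Int × Int) :
    List (Int × Int) × PySem.Set (Int × Int) :=
  if 0 ≤ x + w.1 ∧ x + w.1 < pvH board ∧ 0 ≤ y + w.2 ∧ y + w.2 < pvW board ∧
      y + w.2 < ((PySem.List.pyGetD board (x + w.1) []).length : Int) ∧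
      PySem.List.pyGetD (PySem.List.pyGetD board (x + w.1) []) (y + w.2) "" = "r" ∧
      st.2.contains (x + w.1, y + w.2) = false
  then (st.1 ++ [(x + w.1, y + w.2)], PySem.Set.add st.2 (x + w.1, y + w.2))
  else st

theorem pvCondB_iff (board : List (List String)) (hR : pvRect board) (x y : Int)
    (w : Int × Int) (s : PySem.Set (Int × Int)) :
    (0 ≤ x + w.1 ∧ x + w.1 < pvH board ∧ 0 ≤ y + w.2 ∧ y + w.2 < pvW board ∧
      y + w.2 < ((PySem.List.pyGetD board (x + w.1) []).length : Int) ∧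
      PySem.List.pyGetD (PySem.List.pyGetD board (x + w.1) []) (y + w.2) "" = "r" ∧
      s.contains (x + w.1, y + w.2) = false) ↔
    (pvValid board (x + w.1) (y + w.2) = true ∧ s.contains (x + w.1, y + w.2) = false) := by
  constructor
  · rintro ⟨h1, h2, h3, h4, -, h6, h7⟩
    exact ⟨decide_eq_true ⟨h1, h2, h3, h4, h6⟩, h7⟩
  · rintro ⟨hv, h7⟩
    obtain ⟨h1, h2, h3, h4, h6⟩ := pvValid_bounds hv
    exact ⟨h1, h2, h3, h4, lt_of_lt_of_le h4 (pvRowLen board hR h1 h2), h6, h7⟩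

theorem pvInner_rect (board : List (List String)) (hR : pvRect board) (x y : Int) :
    ∀ (ws : List (Int × Int)) (qA : List (Int × Int × String)) (vis : PySem.Set (Int × Int)),
      (∀ t ∈ qA, pvInv board t) →
      (ws.foldl (pvBodyB board x y) (qA.map pvPi, vis) =
        ((((ws.filter (fun w => pvValid board (x + w.1) (y + w.2))).map
            (fun w => (x + w.1, y + w.2))).foldl (pvStepPure board) (qA, vis)).1.map pvPi,
         (((ws.filter (fun w => pvValid board (x + w.1) (y + w.2))).map
            (fun w => (x + w.1, y + w.2))).foldl (pvStepPure board) (qA, vis)).2)) ∧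
      ∀ t ∈ (((ws.filter (fun w => pvValid board (x + w.1) (y + w.2))).map
            (fun w => (x + w.1, y + w.2))).foldl (pvStepPure board) (qA, vis)).1, pvInv board t := by
  intro ws
  induction ws with
  | nil => exact fun qA vis hq => ⟨rfl, hq⟩
  | cons w ws ih =>
    intro qA vis hq
    by_cases hv : pvValid board (x + w.1) (y + w.2) = true
    · simp only [List.filter_cons, hv, if_true, List.map_cons, List.foldl_cons]
      by_cases hc : vis.contains (x + w.1, y + w.2) = true
      · have hmem := (PySem.Set.contains_iff vis _).mp hc
        have hA : pvStepPure board (qA, vis) (x + w.1, y + w.2) = (qA, vis) := by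
          unfold pvStepPure; simp [hmem]
        have hB : pvBodyB board x y (qA.map pvPi, vis) w = (qA.map pvPi, vis) := by
          unfold pvBodyB
          rw [if_neg]
          intro h
          rw [((pvCondB_iff board hR x y w vis).mp h).2] at hc
          cases hc
        rw [hA, hB]
        exact ih qA vis hq
      · rw [Bool.not_eq_true] at hc
        have hnm : (x + w.1, y + w.2) ∉ vis := fun hm => by
          rw [(PySem.Set.contains_iff vis _).mpr hm] at hc; cases hc
        obtain ⟨h1, h2, h3, h4, h6⟩ := pvValid_bounds hv
        have hA : pvStepPure board (qA, vis) (x + w.1, y + w.2) =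
            (qA ++ [(x + w.1, y + w.2, pvCell board (x + w.1) (y + w.2))],
              PySem.Set.add vis (x + w.1, y + w.2)) := by
          unfold pvStepPure; simp [hnm]
        have hB : pvBodyB board x y (qA.map pvPi, vis) w =
            (qA.map pvPi ++ [(x + w.1, y + w.2)], PySem.Set.add vis (x + w.1, y + w.2)) := by
          unfold pvBodyB
          rw [if_pos ((pvCondB_iff board hR x y w vis).mpr ⟨hv, hc⟩)]
        rw [hA, hB]
        have hq' : ∀ t ∈ qA ++ [(x + w.1, y + w.2, pvCell board (x + w.1) (y + w.2))],
            pvInv board t := by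
          intro t ht
          rcases List.mem_append.mp ht with h | h
          · exact hq t h
          · rcases List.mem_singleton.mp h with rfl
            refine ⟨h1, h2, h3, h4, rfl, ?_⟩
            intro hcon
            have hcon' : pvCell board (x + w.1) (y + w.2) = "h" := hcon
            rw [h6] at hcon'
            exact absurd hcon' (by decide)
        have := ih (qA ++ [(x + w.1, y + w.2, pvCell board (x + w.1) (y + w.2))])
          (PySem.Set.add vis (x + w.1, y + w.2)) hq'
        simpa [pvPi] using this
    · rw [Bool.not_eq_true] at hv
      simp only [List.filter_cons, hv, Bool.false_eq_true, if_false]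
      have hB : pvBodyB board x y (qA.map pvPi, vis) w = (qA.map pvPi, vis) := by
        unfold pvBodyB
        rw [if_neg]
        intro h
        rw [((pvCondB_iff board hR x y w vis).mp h).1] at hv
        cases hv
      rw [List.foldl_cons, hB]
      exact ih qA vis hq

theorem pvLoop_rect (board : List (List String)) (hR : pvRect board)
    (g : PySem.Dict (Int × Int) (List (Int × Int)))
    (hg : ∀ x y : Int, 0 ≤ x → x < pvH board → 0 ≤ y → y < pvW board →
      g.get? (x, y) = some (pvNbrs board x y)) :
    ∀ (fuel : Nat) (qA : List (Int × Int × String)) (vis : PySem.Set (Int × Int)) (dens : Int),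
      (∀ t ∈ qA, pvInv board t) →
      pvBfsLoopA board g fuel qA vis dens =
        some (pvRegionLoopB board (pvH board) (pvW board) fuel (qA.map pvPi) vis dens) := by
  intro fuel
  induction fuel with
  | zero => intro qA vis dens _; rfl
  | succ fuel ih =>
    intro qA vis dens hq
    cases qA with
    | nil => rfl
    | cons t rest =>
      obtain ⟨h1, h2, h3, h4, h5, h6⟩ := hq t List.mem_cons_self
      have hrest : ∀ t' ∈ rest, pvInv board t' := fun t' h => hq t' (List.mem_cons_of_mem t h)
      have hbeq : (t.2.2 == "h") = false := beq_eq_false_iff_ne.mpr h6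
      have hstep := pvStepA_rect board hR vis rest (pvNbrs board t.1 t.2.1)
        (fun n hn => by
          unfold pvNbrs at hn
          rw [List.mem_map] at hn
          obtain ⟨w, hw, rfl⟩ := hn
          exact (List.mem_filter.mp hw).2)
      obtain ⟨hfold, hinv⟩ := pvInner_rect board hR t.1 t.2.1 pvWaysA rest vis hrest
      show (if t.2.2 == "h" then pvBfsLoopA board g fuel rest vis dens
        else match g.get? (t.1, t.2.1) with
          | none => none
          | some ns => match pvBfsStepA board vis rest ns with
            | none => none
            | some st => pvBfsLoopA board g fuel st.1 st.2 (dens + 1)) = _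
      rw [hbeq]
      simp only [Bool.false_eq_true, if_false, hg t.1 t.2.1 h1 h2 h3 h4, hstep]
      have hIH := ih (List.foldl (pvStepPure board) (rest, vis) (pvNbrs board t.1 t.2.1)).1
        (List.foldl (pvStepPure board) (rest, vis) (pvNbrs board t.1 t.2.1)).2 (dens + 1)
        (by exact hinv)
      rw [hIH]
      congr 1
      show _ = pvRegionLoopB board (pvH board) (pvW board) (fuel + 1)
        ((t.1, t.2.1) :: rest.map pvPi) vis dens
      have hcons : pvRegionLoopB board (pvH board) (pvW board) (fuel + 1)
          ((t.1, t.2.1) :: rest.map pvPi) vis dens =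
          pvRegionLoopB board (pvH board) (pvW board) fuel
            (pvWaysA.foldl (pvBodyB board t.1 t.2.1) (rest.map pvPi, vis)).1
            (pvWaysA.foldl (pvBodyB board t.1 t.2.1) (rest.map pvPi, vis)).2 (dens + 1) := rfl
      rw [hcons, hfold]
      rfl

theorem pvBfsA_rect (board : List (List String)) (hR : pvRect board) {x y : Int}
    (hx0 : 0 ≤ x) (hx : x < pvH board) (hy0 : 0 ≤ y) (hy : y < pvW board)
    (hcell : pvCell board x y ≠ "h") :
    pvBfsA x y board = some (pvRegionB board (pvH board) (pvW board) x y) := by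
  unfold pvBfsA pvRegionB
  rw [pvGraphA_rect board hR]
  simp only [pvRowRead board hx0 hx, pvColRead board hR hx0 hx hy0 hy]
  have hfuel : board.length * (board.headD []).length + 2 =
      (pvH board).toNat * (pvW board).toNat + 2 := by
    unfold pvH pvW; simp
  rw [hfuel]
  rw [pvLoop_rect board hR (pvGraphPure board)
    (fun a b ha1 ha2 hb1 hb2 => pvGraphPure_get? board hR a b ha1 ha2 hb1 hb2)
    ((pvH board).toNat * (pvW board).toNat + 2)
    [(x, y, pvCell board x y)] (PySem.Set.add PySem.Set.empty (x, y)) 0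
    (fun t ht => by
      rcases List.mem_singleton.mp ht with rfl
      exact ⟨hx0, hx, hy0, hy, rfl, hcell⟩)]
  rfl

theorem pvTakeCell (board : List (List String)) (hR : pvRect board) {r c : Int}
    (hr0 : 0 ≤ r) (hr : r < pvH board) (hc0 : 0 ≤ c) (hc : c < pvW board) :
    PySem.List.pyGetD ((PySem.List.pyGetD board r []).take (pvW board).toNat) c "" =
      pvCell board r c := by
  have hlen := pvRowLen board hR hr0 hr
  have h0W : (0 : Int) ≤ pvW board := by unfold pvW; exact Int.natCast_nonneg _
  have hcl : c.toNat < ((PySem.List.pyGetD board r []).take (pvW board).toNat).length := by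
    rw [List.length_take]; omega
  rw [PySem.List.pyGetD_eq_getElem _ "" hc0 (by omega), List.getElem_take]
  unfold pvCell
  rw [PySem.List.pyGetD_eq_getElem _ "" hc0 (by omega)]

theorem pvTakeLen (board : List (List String)) (hR : pvRect board) {r : Int}
    (hr0 : 0 ≤ r) (hr : r < pvH board) :
    (((PySem.List.pyGetD board r []).take (pvW board).toNat).length : Int) = pvW board := by
  have hlen := pvRowLen board hR hr0 hr
  have h0W : (0 : Int) ≤ pvW board := by unfold pvW; exact Int.natCast_nonneg _
  rw [List.length_take]
  push_cast
  omega

theorem pvCheckA_rect (board : List (List String)) (hR : pvRect board) (v : String)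
    (hv : v ≠ "h") :
    pvCheckA board v = some (pvDensB board (pvH board) (pvW board) v) := by
  unfold pvCheckA pvDensB
  have hH : ((board.length : Int)) = pvH board := rfl
  have hW : (((board.headD []).length : Int)) = pvW board := rfl
  rw [hH, hW]
  rw [pvFoldlM_eq_some _ _
    (fun dens r => (PySem.List.pyRange 0 (pvW board)).foldl
      (fun dens c => if pvCell board r c == v then dens + pvRegionB board (pvH board) (pvW board) r c else dens) dens)
    (fun dens r hr => ?_) 0]
  · congr 1
    refine PySem.List.foldl_congr_mem _ _ _ _ (fun acc r hr => ?_)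
    obtain ⟨hr0, hrH⟩ := PySem.List.mem_pyRange_one.mp hr
    rw [PySem.List.enumerate_eq_map_pyRange _ "", List.foldl_map]
    rw [show PySem.List.len ((PySem.List.pyGetD board r []).take (pvW board).toNat) = pvW board by
      rw [PySem.List.len_eq]; exact pvTakeLen board hR hr0 hrH]
    refine PySem.List.foldl_congr_mem _ _ _ _ (fun acc2 c hc => ?_)
    obtain ⟨hc0, hcW⟩ := PySem.List.mem_pyRange_one.mp hc
    rw [pvTakeCell board hR hr0 hrH hc0 hcW]
  · obtain ⟨hr0, hrH⟩ := PySem.List.mem_pyRange_one.mp hr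
    refine pvFoldlM_eq_some _ _ _ (fun dens2 c hc => ?_) dens
    obtain ⟨hc0, hcW⟩ := PySem.List.mem_pyRange_one.mp hc
    rw [pvColRead board hR hr0 hrH hc0 hcW]
    show (if (pvCell board r c == v) = true
        then Option.map (fun d => dens2 + d) (pvBfsA r c board) else some dens2) = _
    by_cases he : pvCell board r c == v
    · have hev : pvCell board r c = v := eq_of_beq he
      rw [if_pos he, if_pos he, pvBfsA_rect board hR hr0 hrH hc0 hcW (by rw [hev]; exact hv)]
      rfl
    · rw [if_neg he, if_neg he]

theorem pvFoldlId {α β : Type} (l : List α) (f : β → α → β) (i : β)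
    (h : ∀ acc : β, ∀ x ∈ l, f acc x = acc) : l.foldl f i = i := by
  induction l generalizing i with
  | nil => rfl
  | cons a l ih =>
    rw [List.foldl_cons, h i a List.mem_cons_self]
    exact ih i (fun acc x hx => h acc x (List.mem_cons_of_mem a hx))

theorem pvIntlike_ne_h {s : String} (h : (PySem.Int.ofStr? s).isSome) : s ≠ "h" := by
  intro hs
  rw [hs] at h
  exact absurd h (by decide)

def pvStepTop (board : List (List String)) (player : String) (diff : Int) (s : String) : Int :=
  if pvIsIntlike s then
    diff + (if s == player then pvDensB board (pvH board) (pvW board) s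
      else -(pvDensB board (pvH board) (pvW board) s))
  else diff

theorem pvA_cells_rect (board : List (List String)) (player : String) (hR : pvRect board) :
    difference_of_density board player =
      (board.flatMap (fun row => row.take (pvW board).toNat)).foldl
        (pvStepTop board player) 0 := by
  unfold difference_of_density
  rw [show ((board.length : Int)) = pvH board from rfl,
    show (((board.headD []).length : Int)) = pvW board from rfl]
  have hout : ∀ (acc : Int), ∀ r ∈ PySem.List.pyRange 0 (pvH board),
      (PySem.List.pyRange 0 (pvW board)).foldl (fun diff c =>
        match PySem.List.pyGet? (PySem.List.pyGetD board r []) c with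
        | none => diff
        | some s =>
          match PySem.Int.ofStr? s with
          | none => diff
          | some _ =>
            match pvCheckA board s with
            | none => diff
            | some dens => if s == player then diff + dens else diff - dens) acc =
      ((PySem.List.pyGetD board r []).take (pvW board).toNat).foldl
        (pvStepTop board player) acc := by
    intro acc r hr
    obtain ⟨hr0, hrH⟩ := PySem.List.mem_pyRange_one.mp hr
    have hlen := pvTakeLen board hR hr0 hrH
    have hbody : ∀ (acc2 : Int), ∀ c ∈ PySem.List.pyRange 0 (pvW board),
        (match PySem.List.pyGet? (PySem.List.pyGetD board r []) c with
        | none => acc2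
        | some s =>
          match PySem.Int.ofStr? s with
          | none => acc2
          | some _ =>
            match pvCheckA board s with
            | none => acc2
            | some dens => if s == player then acc2 + dens else acc2 - dens) =
        pvStepTop board player acc2
          (PySem.List.pyGetD ((PySem.List.pyGetD board r []).take (pvW board).toNat) c "") := by
      intro acc2 c hc
      obtain ⟨hc0, hcW⟩ := PySem.List.mem_pyRange_one.mp hc
      rw [pvColRead board hR hr0 hrH hc0 hcW, pvTakeCell board hR hr0 hrH hc0 hcW]
      show (match PySem.Int.ofStr? (pvCell board r c) with
        | none => acc2
        | some _ =>
          match pvCheckA board (pvCell board r c) with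
          | none => acc2
          | some dens => if pvCell board r c == player then acc2 + dens else acc2 - dens) = _
      unfold pvStepTop pvIsIntlike
      cases hos : PySem.Int.ofStr? (pvCell board r c) with
      | none => rfl
      | some n =>
        have hnh : pvCell board r c ≠ "h" := pvIntlike_ne_h (by rw [hos]; rfl)
        rw [pvCheckA_rect board hR _ hnh]
        show (if pvCell board r c == player then acc2 + pvDensB board (pvH board) (pvW board) (pvCell board r c)
            else acc2 - pvDensB board (pvH board) (pvW board) (pvCell board r c)) = _
        by_cases hp : pvCell board r c == player
        · simp [hp]
        · simp only [hp, Bool.false_eq_true, if_false, Option.isSome_some, if_true]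
          rw [sub_eq_add_neg]
    rw [PySem.List.foldl_congr_mem _ _ _ acc hbody]
    conv_lhs => rw [show PySem.List.pyRange 0 (pvW board) =
      PySem.List.pyRange 0 ((((PySem.List.pyGetD board r []).take (pvW board).toNat).length : Int))
      from by rw [hlen]]
    rw [PySem.List.foldl_pyRange_pyGetD'
      ((PySem.List.pyGetD board r []).take (pvW board).toNat) "" (pvStepTop board player) acc le_rfl]
    rw [Int.toNat_zero, List.drop_zero]
  rw [PySem.List.foldl_congr_mem _ _ _ 0 hout]
  rw [show pvH board = ((board.length : Int)) from rfl]
  rw [PySem.List.foldl_pyRange_pyGetD' board []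
    (fun acc row => (row.take (pvW board).toNat).foldl (pvStepTop board player) acc) 0 le_rfl]
  rw [Int.toNat_zero, List.drop_zero, List.foldl_flatMap]

theorem pvGroup (l : List String) (f : String → Int) :
    (l.map f).sum = ((PySem.Set.ofList l).map (fun k => (l.count k : Int) * f k)).sum := by
  rw [Finset.sum_list_map_count l f, ← List.sum_toFinset _ (PySem.Set.nodup_ofList l)]
  have hfs : (PySem.Set.ofList l).toFinset = l.toFinset := by
    ext a
    simp [List.mem_toFinset, PySem.Set.mem_ofList]
  rw [hfs]
  refine Finset.sum_congr rfl (fun m _ => ?_)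
  rw [nsmul_eq_mul]

theorem pvTop_rect (board : List (List String)) (player : String) (hR : pvRect board) :
    difference_of_density board player = difference_of_density_alt board player := by
  cases board with
  | nil => rfl
  | cons b bs =>
    rw [pvA_cells_rect _ _ hR]
    show _ = (PySem.Dict.counter (((b :: bs).flatMap
        (fun row => row.take (pvW (b :: bs)).toNat)).filter pvIsIntlike)).items.foldl
      (fun total vn =>
        total + (if vn.1 == player then vn.2 * pvDensB (b :: bs) (pvH (b :: bs)) (pvW (b :: bs)) vn.1
          else -(vn.2 * pvDensB (b :: bs) (pvH (b :: bs)) (pvW (b :: bs)) vn.1))) 0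
    unfold pvStepTop
    rw [← List.foldl_filter, PySem.List.foldl_add, zero_add, pvGroup]
    rw [PySem.List.foldl_add, zero_add, PySem.Dict.items_counter, List.map_map]
    refine congrArg List.sum (List.map_congr_left (fun k _ => ?_))
    simp only [Function.comp_apply]
    by_cases hp : k == player
    · simp [hp]
    · simp only [hp, Bool.false_eq_true, if_false]
      rw [mul_neg]

theorem pvA_noint (board : List (List String)) (player : String)
    (hNI : ∀ row ∈ board, ∀ s ∈ row.take (board.headD []).length,
      (PySem.Int.ofStr? s).isSome = false) :
    difference_of_density board player = 0 := by
  unfold difference_of_density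
  refine pvFoldlId _ _ _ (fun acc r hr => ?_)
  obtain ⟨hr0, hrH⟩ := PySem.List.mem_pyRange_one.mp hr
  refine pvFoldlId _ _ _ (fun acc2 c hc => ?_)
  obtain ⟨hc0, hcW⟩ := PySem.List.mem_pyRange_one.mp hc
  cases hg : PySem.List.pyGet? (PySem.List.pyGetD board r []) c with
  | none => rfl
  | some s =>
    have hrow : PySem.List.pyGetD board r [] ∈ board := by
      rw [PySem.List.pyGetD_eq_getElem board [] hr0 hrH]
      exact List.getElem_mem _
    have hclt : c.toNat < (PySem.List.pyGetD board r []).length := by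
      rw [PySem.List.pyGet?_of_nonneg _ hc0] at hg
      exact (List.getElem?_eq_some_iff.mp hg).1
    have hs : s = (PySem.List.pyGetD board r [])[c.toNat] := by
      rw [PySem.List.pyGet?_of_nonneg _ hc0, List.getElem?_eq_getElem hclt] at hg
      exact (Option.some_inj.mp hg).symm
    have hmem : s ∈ (PySem.List.pyGetD board r []).take (board.headD []).length := by
      have hcW' : c.toNat < (board.headD []).length := by omega
      rw [hs]
      have : ((PySem.List.pyGetD board r []).take (board.headD []).length)[c.toNat]'(by
          rw [List.length_take]; omega) = (PySem.List.pyGetD board r [])[c.toNat] :=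
        List.getElem_take
      rw [← this]
      exact List.getElem_mem _
    have hisf := hNI _ hrow s hmem
    have hnone : PySem.Int.ofStr? s = none := by
      cases hos : PySem.Int.ofStr? s with
      | none => rfl
      | some n => rw [hos] at hisf; cases hisf
    show (match PySem.Int.ofStr? s with
      | none => acc2
      | some _ =>
        match pvCheckA board s with
        | none => acc2
        | some dens => if s == player then acc2 + dens else acc2 - dens) = acc2
    rw [hnone]

theorem pvAlt_noint (b : List String) (bs : List (List String)) (player : String)
    (hNI : ∀ row ∈ b :: bs, ∀ s ∈ row.take ((b :: bs).headD []).length,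
      (PySem.Int.ofStr? s).isSome = false) :
    difference_of_density_alt (b :: bs) player = 0 := by
  unfold difference_of_density_alt
  have hfilter : ((b :: bs).flatMap
      (fun row => row.take (((((b :: bs).headD []).length : Int))).toNat)).filter pvIsIntlike = [] := by
    rw [List.filter_eq_nil_iff]
    intro s hs
    rw [List.mem_flatMap] at hs
    obtain ⟨row, hrow, hsrow⟩ := hs
    have : (PySem.Int.ofStr? s).isSome = false := hNI row hrow s (by simpa using hsrow)
    unfold pvIsIntlike
    simp [this]
  simp only [List.isEmpty_cons, Bool.false_eq_true, if_false]
  rw [hfilter]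
  rfl

-- ===== VERDICT (by name: the statement is the Claim_ definition above) =====
theorem difference_of_density_spec : Claim_unchanged_difference_of_density := by
  intro board player _hdom
  unfold Spec_difference_of_density
  intro hnD
  unfold D_difference_of_density at hnD
  rw [not_and_or] at hnD
  rcases hnD with h | h
  · have hR : pvRect board := by
      intro row hrow
      rw [List.any_eq_true] at h
      by_contra hlt
      exact h ⟨row, hrow, decide_eq_true (by omega)⟩
    exact pvTop_rect board player hR
  · have hNI : ∀ row ∈ board, ∀ s ∈ row.take (board.headD []).length,
        (PySem.Int.ofStr? s).isSome = false := by
      intro row hrow s hs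
      rw [List.any_eq_true] at h
      by_contra hx
      rw [Bool.not_eq_false] at hx
      exact h ⟨row, hrow, List.any_eq_true.mpr ⟨s, hs, hx⟩⟩
    cases board with
    | nil => rfl
    | cons b bs => rw [pvA_noint _ player hNI, pvAlt_noint b bs player hNI]

theorem difference_of_density_changed : Claim_changed_difference_of_density := by
  unfold Claim_changed_difference_of_density; decide
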